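-- pv_equiv track=rewrite | github.com/Kappayaba/Coding_Accel | Python_projects/Epreuve_du_feu/caps.py | Maj
-- ===== SOURCE A (Python) =====
-- def Maj(*arg):
--     sentence = ''
--     new_string = ''
--     len_lst = []
--     for string in arg[0]:
--         len_lst.append(len(string))
--         sentence += string
--
--     for i in range(len(sentence)):
--         if i % 2 == 0:
--             new_string += sentence[i].lower()
--         else:
--             new_string += sentence[i].upper()
--
--     for e in len_lst:
--         new_string = new_string[e:] + ' ' + new_string[:e]
--
--
--     return new_string[1:]
-- ===== SOURCE B (Python) =====
-- def Maj(*arg):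
--     words = arg[0]
--     # alternate-case all characters in one pass with a running index
--     chars = []
--     i = 0
--     for w in words:
--         for c in w:
--             chars.append(c.upper() if i % 2 else c.lower())
--             i += 1
--     # the string is represented as front[::-1] + back; each step appends a
--     # space at the end and rotates left by len(w), moving chars one by one
--     # (amortised O(n + k) overall since each word length is consumed once)
--     front = chars[::-1]
--     back = []
--     for w in words:
--         back.append(' ')
--         for _ in range(len(w)):
--             if not front:
--                 front = back[::-1]
--                 back = []
--             back.append(front.pop())
--     s = front[::-1] + back
--     return ''.join(s)[1:]
-- ===== Notes on version B (the rewrite author's own statement) =====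
-- stated objective: faster
-- what changed: B alternates case in one pass over the words (running index instead of re-indexing the joined string) and replaces A's k full-string slice-rotations by an amortised front/back rotation buffer that moves each character once, building the result in O(n+k) instead of O(k*n).
import Mathlib
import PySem

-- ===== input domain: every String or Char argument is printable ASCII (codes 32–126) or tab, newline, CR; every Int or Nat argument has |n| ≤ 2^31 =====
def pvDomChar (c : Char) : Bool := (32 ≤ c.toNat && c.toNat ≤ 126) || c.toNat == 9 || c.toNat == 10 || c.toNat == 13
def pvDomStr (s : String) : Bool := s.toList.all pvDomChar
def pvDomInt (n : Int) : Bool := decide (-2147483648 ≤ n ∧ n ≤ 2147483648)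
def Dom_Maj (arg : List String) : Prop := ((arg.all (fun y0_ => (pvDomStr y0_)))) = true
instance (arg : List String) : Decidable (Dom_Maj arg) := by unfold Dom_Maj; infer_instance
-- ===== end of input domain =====

-- B replaces A's per-word full-string re-slicing (O(k·n)) by an amortised front/back
-- rotation buffer built in one pass (O(n+k)); equivalence of the return values is proved.

-- ===== PORT A =====
-- first loop: len_lst.append(len(string)); sentence += string
-- second loop: alternate case by index (sentence[i] is always in range, so pyGetD is exact)
-- third loop: new_string = new_string[e:] + ' ' + new_string[:e]
def Maj (arg : List String) : String :=
  let p := arg.foldl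
    (fun (p : List Int × List Char) s =>
      (p.1 ++ [(s.toList.length : Int)], p.2 ++ s.toList)) ([], [])
  let lenLst := p.1
  let sentence := p.2
  let newString := (PySem.List.pyRange 0 (sentence.length : Int) 1).foldl
    (fun acc i =>
      if PySem.Int.mod i 2 == 0 then
        acc ++ PySem.Chars.lower [PySem.List.pyGetD sentence i ' ']
      else
        acc ++ PySem.Chars.upper [PySem.List.pyGetD sentence i ' ']) []
  let final := lenLst.foldl
    (fun s e => PySem.List.slice s (some e) none ++ [' '] ++ PySem.List.slice s none (some e)) newString
  String.ofList (PySem.List.slice final (some 1) none)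

-- ===== PORT B =====
-- Source B keeps the Python list `front` with the string's prefix reversed (pop() = first char);
-- the Lean port stores that prefix in string order, so Python's front.pop() is taking the
-- head, and the refill front = back[::-1] is taking back itself. pvMove is Source B's inner
-- `for _ in range(len(w))` loop: move one char from the front to the back e times.
def pvMove : Nat → List Char → List Char → List Char × List Char
  | 0, f, b => (f, b)
  | e + 1, [], b =>                  -- if not front: front = back[::-1]; back = []
    match b with
    | [] => ([], [])                 -- unreachable guard (Python's front.pop() would raise here)
    | c :: b' => pvMove e b' [c]     -- back.append(front.pop())
  | e + 1, c :: f', b => pvMove e f' (b ++ [c])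

def Maj_alt (arg : List String) : String :=
  let chars := (arg.foldl
    (fun (q : List Char × Nat) w =>
      w.toList.foldl
        (fun (q : List Char × Nat) c =>
          (q.1 ++ [if q.2 % 2 ≠ 0 then PySem.Chars.upperChar c else PySem.Chars.lowerChar c],
           q.2 + 1)) q) (([] : List Char), 0)).1
  let fb := arg.foldl
    (fun (p : List Char × List Char) w => pvMove w.toList.length p.1 (p.2 ++ [' ']))
    (chars, ([] : List Char))
  String.ofList ((fb.1 ++ fb.2).drop 1)

-- ===== PRECONDITION & SPEC =====
def Spec_Maj (arg : List String) (out : String) : Prop := out = Maj_alt arg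
instance (arg : List String) (out : String) : Decidable (Spec_Maj arg out) := by unfold Spec_Maj; infer_instance

-- ===== CLAIM (what is proved, stated in full; the proofs are below) =====
def Claim_equal_Maj : Prop := ∀ (arg : List String), Dom_Maj arg → Spec_Maj arg (Maj arg)

-- ===== LEMMAS AND PROOFS =====

theorem lemA1 (ws : List String) (acc : List Int × List Char) :
    ws.foldl (fun (p : List Int × List Char) s =>
        (p.1 ++ [(s.toList.length : Int)], p.2 ++ s.toList)) acc
      = (acc.1 ++ ws.map (fun s => (s.toList.length : Int)),
         acc.2 ++ (ws.map String.toList).flatten) := by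
  induction ws generalizing acc with
  | nil => simp
  | cons w ws ih => rw [List.foldl_cons, ih]; simp

def altSpec : Nat → List Char → List Char
  | _, [] => []
  | j, c :: cs =>
    (if j % 2 = 0 then PySem.Chars.lowerChar c else PySem.Chars.upperChar c) :: altSpec (j + 1) cs

theorem length_altSpec (j : Nat) (s : List Char) : (altSpec j s).length = s.length := by
  induction s generalizing j with
  | nil => rfl
  | cons c cs ih => simp [altSpec, ih]

theorem altSpec_append (j : Nat) (s t : List Char) :
    altSpec j (s ++ t) = altSpec j s ++ altSpec (j + s.length) t := by
  induction s generalizing j with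
  | nil => simp [altSpec]
  | cons c cs ih => simp [altSpec, ih]; ring_nf

theorem lemB1inner (w : List Char) (q : List Char × Nat) :
    w.foldl (fun (q : List Char × Nat) c =>
        (q.1 ++ [if q.2 % 2 ≠ 0 then PySem.Chars.upperChar c else PySem.Chars.lowerChar c],
         q.2 + 1)) q
      = (q.1 ++ altSpec q.2 w, q.2 + w.length) := by
  induction w generalizing q with
  | nil => simp [altSpec]
  | cons c cs ih =>
    rw [List.foldl_cons, ih]
    simp [altSpec]
    by_cases h : q.2 % 2 = 0 <;> simp [h] <;> omega

theorem lemB1 (ws : List String) (q : List Char × Nat) :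
    ws.foldl (fun (q : List Char × Nat) w =>
        w.toList.foldl (fun (q : List Char × Nat) c =>
          (q.1 ++ [if q.2 % 2 ≠ 0 then PySem.Chars.upperChar c else PySem.Chars.lowerChar c],
           q.2 + 1)) q) q
      = (q.1 ++ altSpec q.2 (ws.map String.toList).flatten,
         q.2 + ((ws.map String.toList).flatten).length) := by
  induction ws generalizing q with
  | nil => simp [altSpec]
  | cons w ws ih =>
    rw [List.foldl_cons, lemB1inner, ih]
    simp [altSpec_append]
    omega

theorem pvMove_spec (e : Nat) (f b : List Char) (h : e ≤ f.length + b.length) :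
    (pvMove e f b).1 ++ (pvMove e f b).2
      = (f ++ b).drop e ++ (f ++ b).take e := by
  induction e generalizing f b with
  | zero => simp [pvMove]
  | succ e ih =>
    cases f with
    | nil =>
      cases b with
      | nil => simp at h
      | cons c b' =>
        simp only [pvMove]
        rw [ih b' [c] (by simp at h ⊢; omega)]
        simp at h
        rw [List.drop_append_of_le_length (by omega : e ≤ b'.length),
            List.take_append_of_le_length (by omega : e ≤ b'.length)]
        simp
    | cons c f' =>
      simp only [pvMove]
      rw [ih f' (b ++ [c]) (by simp at h ⊢; omega)]
      simp at h
      rw [show f' ++ (b ++ [c]) = (f' ++ b) ++ [c] by simp,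
          List.drop_append_of_le_length (by simp; omega),
          List.take_append_of_le_length (by simp; omega)]
      simp

theorem lemRot (ws : List String) (f b : List Char)
    (h : ∀ w ∈ ws, w.toList.length ≤ (f ++ b).length) :
    (ws.foldl (fun (p : List Char × List Char) w =>
        pvMove w.toList.length p.1 (p.2 ++ [' '])) (f, b)).1
      ++ (ws.foldl (fun (p : List Char × List Char) w =>
        pvMove w.toList.length p.1 (p.2 ++ [' '])) (f, b)).2
      = ws.foldl (fun s w => s.drop w.toList.length ++ ' ' :: s.take w.toList.length) (f ++ b) := by
  induction ws generalizing f b with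
  | nil => rfl
  | cons w ws ih =>
    rw [List.foldl_cons, List.foldl_cons]
    have hw : w.toList.length ≤ (f ++ b).length := h w (by simp)
    have hlen : w.toList.length ≤ f.length + (b ++ [' ']).length := by simp at hw ⊢; omega
    -- the next state of the pair, as (fst, snd)
    have hpair : pvMove w.toList.length f (b ++ [' '])
        = ((pvMove w.toList.length f (b ++ [' '])).1, (pvMove w.toList.length f (b ++ [' '])).2) := rfl
    rw [hpair]
    have hcomb := pvMove_spec w.toList.length f (b ++ [' ']) hlen
    have hstep : (f ++ (b ++ [' '])).drop w.toList.length ++ (f ++ (b ++ [' '])).take w.toList.length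
        = (f ++ b).drop w.toList.length ++ ' ' :: (f ++ b).take w.toList.length := by
      rw [show f ++ (b ++ [' ']) = (f ++ b) ++ [' '] by simp,
          List.drop_append_of_le_length hw, List.take_append_of_le_length hw]
      simp
    rw [ih _ _ ?_]
    · rw [hcomb, hstep]
    · intro v hv
      rw [hcomb, hstep]
      have := h v (by simp [hv])
      simp at this ⊢
      omega

theorem lemA3 (ws : List String) (s : List Char) :
    (ws.map (fun w => (w.toList.length : Int))).foldl
      (fun s e => PySem.List.slice s (some e) none ++ [' '] ++ PySem.List.slice s none (some e)) s
      = ws.foldl (fun s w => s.drop w.toList.length ++ ' ' :: s.take w.toList.length) s := by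
  rw [List.foldl_map]
  apply PySem.List.foldl_congr_mem
  intro acc w hw
  rw [PySem.List.slice_from_natCast, PySem.List.slice_to_natCast]
  simp

theorem mem_length_le_flatten (ws : List String) (w : String) (hw : w ∈ ws) :
    w.toList.length ≤ ((ws.map String.toList).flatten).length := by
  induction ws with
  | nil => simp at hw
  | cons v vs ih =>
    simp at hw ⊢
    rcases hw with h | h
    · subst h; omega
    · have := ih h; simp at this; omega

theorem lemA2gen (s : List Char) (j : Nat) (acc : List Char) (hj : j ≤ s.length) :
    (PySem.List.pyRange (j : Int) (s.length : Int) 1).foldl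
      (fun acc i =>
        if PySem.Int.mod i 2 == 0 then
          acc ++ PySem.Chars.lower [PySem.List.pyGetD s i ' ']
        else
          acc ++ PySem.Chars.upper [PySem.List.pyGetD s i ' ']) acc
      = acc ++ altSpec j (s.drop j) := by
  by_cases hlt : j < s.length
  · rw [PySem.List.pyRange_one_cons (by exact_mod_cast hlt), List.foldl_cons]
    have hdrop : s.drop j = s[j] :: s.drop (j+1) := List.drop_eq_getElem_cons hlt
    have hget : PySem.List.pyGetD s (j : Int) ' ' = s[j] := by
      rw [PySem.List.pyGetD_natCast]; simp [List.getD_eq_getElem?_getD, hlt]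
    have hcast : ((j : Int) + 1) = ((j + 1 : Nat) : Int) := by push_cast; ring
    rw [hcast, lemA2gen s (j+1) _ (by omega)]
    rw [hdrop]
    simp only [altSpec, hget, PySem.Chars.lower, PySem.Chars.upper, List.map]
    by_cases hp : j % 2 = 0
    · have hd : (2:Int) ∣ (j:Int) := by omega
      simp [hp, hd]
    · have hd : ¬ (2:Int) ∣ (j:Int) := by omega
      simp [hp, hd]
  · rw [PySem.List.pyRange_one_eq_nil (by exact_mod_cast (by omega : s.length ≤ j)), List.foldl_nil]
    rw [List.drop_of_length_le (by omega)]
    simp [altSpec]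
termination_by s.length - j

-- ===== VERDICT (by name: the statement is the Claim_ definition above) =====
theorem Maj_spec : Claim_equal_Maj := by
  intro arg _
  show Maj arg = Maj_alt arg
  simp only [Maj, Maj_alt, lemA1, lemB1, List.nil_append]
  have h2 := lemA2gen ((List.map String.toList arg).flatten) 0 [] (by omega)
  rw [Nat.cast_zero, List.drop_zero, List.nil_append] at h2
  rw [h2]
  rw [lemA3]
  have hrot := lemRot arg (altSpec 0 ((List.map String.toList arg).flatten)) []
    (by intro w hw
        simp only [List.append_nil, length_altSpec]
        exact mem_length_le_flatten arg w hw)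
  rw [List.append_nil] at hrot
  rw [hrot]
  simp [PySem.List.slice_from_one, List.drop_one]
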